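-- pv_equiv track=rewrite | github.com/anuneetanand/IP_Projects | K-Map_Solver.py | FEPI
-- ===== SOURCE A (Python) =====
-- def FEPI(T,MT):
-- 	'''Finds Essential Prime Implicants From PI'''
-- 	X=[]
-- 	K={i:i.split(',') for i in T}						#Set of PI Terms
-- 	for a in MT:										#Ignore Don't Cares
-- 		c=0
-- 		for b in K.keys():
-- 			if str(a) in K[b]:
-- 				c=c+1
-- 				t=b
-- 		if c==1 and t not in X: 						#If there exists a minterm uniquely covered by the PI
-- 			X.append(t)
-- 	return X
-- ===== SOURCE B (Python) =====
-- def FEPI(T, MT):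
--     '''Finds Essential Prime Implicants From PI'''
--     # Inverted index: minterm string -> list of distinct PIs (first-occurrence order) covering it.
--     idx = {}
--     seen = set()
--     for pi in T:
--         if pi in seen:
--             continue
--         seen.add(pi)
--         for term in dict.fromkeys(pi.split(',')):
--             idx[term] = idx.get(term, []) + [pi]
--     X = []
--     for a in MT:
--         covers = idx.get(str(a), [])
--         if len(covers) == 1:
--             u = covers[0]
--             if u not in X:
--                 X.append(u)
--     return X
-- ===== Notes on version B (the rewrite author's own statement) =====
-- stated objective: faster
-- what changed: Instead of scanning every prime implicant's term list for every minterm, B builds an inverted index (term string -> list of distinct PIs) in one pass and answers each minterm by a single dictionary lookup.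
import Mathlib
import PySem

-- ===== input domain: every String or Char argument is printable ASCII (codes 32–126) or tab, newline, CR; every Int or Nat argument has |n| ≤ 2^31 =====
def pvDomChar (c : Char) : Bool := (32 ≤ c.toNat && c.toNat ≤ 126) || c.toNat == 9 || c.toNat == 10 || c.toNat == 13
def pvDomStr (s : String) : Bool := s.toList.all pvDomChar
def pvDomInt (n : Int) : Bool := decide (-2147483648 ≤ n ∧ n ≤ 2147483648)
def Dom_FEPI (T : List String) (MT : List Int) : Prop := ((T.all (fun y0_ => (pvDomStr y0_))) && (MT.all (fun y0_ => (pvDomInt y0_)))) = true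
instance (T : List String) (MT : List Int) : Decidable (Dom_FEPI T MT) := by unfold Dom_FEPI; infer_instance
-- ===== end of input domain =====

-- B builds an inverted index term -> covering PIs once, replacing A's per-minterm scan of all PIs (faster).

-- ===== PORT A =====
-- Literal port: K = {i: i.split(',') for i in T}; then for each a, count PIs whose term
-- list contains str(a) (t carries the last hit across iterations, as Python's t does);
-- K[b] with b ∈ K.keys is K.getD b [] (never the default).
def FEPI (T : List String) (MT : List Int) : List String :=
  let K : PySem.Dict String (List String) :=
    T.foldl (fun d i => d.insert i ((PySem.Str.split? i ",").getD [])) PySem.Dict.empty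
  (MT.foldl (fun (st : List String × Option String) a =>
      let ct := K.keys.foldl (fun (p : Int × Option String) b =>
          if PySem.Int.toStr a ∈ K.getD b [] then (p.1 + 1, some b) else p) ((0 : Int), st.2)
      (if ct.1 = 1 then
         match ct.2 with
         | some t => if t ∈ st.1 then st.1 else st.1 ++ [t]
         | none => st.1      -- unreachable: ct.1 = 1 forces a hit in this pass
       else st.1, ct.2)) (([] : List String), (none : Option String))).1

-- ===== PORT B =====
-- Literal port of Source B: one pass over T builds idx (term -> distinct PIs covering it,
-- skipping PIs already seen); each minterm is answered by one lookup.
def FEPI_alt (T : List String) (MT : List Int) : List String :=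
  let p := T.foldl (fun (st : PySem.Dict String (List String) × PySem.Set String) pi =>
      if PySem.Set.contains st.2 pi then st
      else ((PySem.List.dedup ((PySem.Str.split? pi ",").getD [])).foldl
              (fun d term => d.insert term (d.getD term [] ++ [pi])) st.1,
            PySem.Set.add st.2 pi))
    (PySem.Dict.empty, PySem.Set.empty)
  MT.foldl (fun X a =>
      let covers := (p.1).getD (PySem.Int.toStr a) []
      if covers.length = 1 then
        let u := covers.headD ""
        if u ∈ X then X else X ++ [u]
      else X) []

-- ===== PRECONDITION & SPEC =====
def Spec_FEPI (T : List String) (MT : List Int) (out : List String) : Prop := out = FEPI_alt T MT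
instance (T : List String) (MT : List Int) (out : List String) : Decidable (Spec_FEPI T MT out) := by unfold Spec_FEPI; infer_instance

-- ===== CLAIM (what is proved, stated in full; the proofs are below) =====
def Claim_equal_FEPI : Prop := ∀ (T : List String) (MT : List Int), Dom_FEPI T MT → Spec_FEPI T MT (FEPI T MT)

-- ===== LEMMAS AND PROOFS =====

-- A's K: value of getD on the dict comprehension.
theorem fepi_K_getD (T : List String) (d : PySem.Dict String (List String)) (q : String) :
    (T.foldl (fun d i => d.insert i ((PySem.Str.split? i ",").getD [])) d).getD q []
      = if q ∈ T then (PySem.Str.split? q ",").getD [] else d.getD q [] := by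
  induction T generalizing d with
  | nil => simp
  | cons i T ih =>
    simp only [List.foldl_cons, ih, List.mem_cons]
    rcases Decidable.em (q ∈ T) with h | h
    · simp [h]
    · rcases Decidable.em (q = i) with h2 | h2
      · simp [h2]
      · simp [h, h2, PySem.Dict.getD_insert]

-- B's inner insert loop over the (nodup) term list of one PI appends pi to each term's bucket.
theorem fepi_ins_getD (M : List String) (pi : String) (d : PySem.Dict String (List String))
    (hnd : M.Nodup) (q : String) :
    (M.foldl (fun d term => d.insert term (d.getD term [] ++ [pi])) d).getD q []
      = if q ∈ M then d.getD q [] ++ [pi] else d.getD q [] := by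
  induction M generalizing d with
  | nil => simp
  | cons t M ih =>
    have ht : t ∉ M := (List.nodup_cons.mp hnd).1
    have hM : M.Nodup := (List.nodup_cons.mp hnd).2
    simp only [List.foldl_cons, ih _ hM, List.mem_cons]
    rcases Decidable.em (q ∈ M) with h | h
    · have hqt : q ≠ t := fun e => ht (e ▸ h)
      simp [h, hqt, PySem.Dict.getD_insert]
    · rcases Decidable.em (q = t) with h2 | h2
      · simp [h2, ht]
      · simp [h, h2, PySem.Dict.getD_insert]

-- B's first loop: idx.getD q [] lists, in order, the distinct PIs whose terms contain q,
-- and the seen-set tracks exactly the PIs processed.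
theorem fepi_idx_getD (T : List String) (d : PySem.Dict String (List String))
    (seen : PySem.Set String) (hnd : seen.Nodup)
    (hinv : ∀ q, d.getD q [] = seen.filter (fun pi => decide (q ∈ (PySem.Str.split? pi ",").getD []))) :
    (∀ q, (T.foldl (fun (st : PySem.Dict String (List String) × PySem.Set String) pi =>
        if PySem.Set.contains st.2 pi then st
        else ((PySem.List.dedup ((PySem.Str.split? pi ",").getD [])).foldl
                (fun d term => d.insert term (d.getD term [] ++ [pi])) st.1,
              PySem.Set.add st.2 pi)) (d, seen)).1.getD q []
      = (PySem.Set.update seen T).filter (fun pi => decide (q ∈ (PySem.Str.split? pi ",").getD []))) := by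
  induction T generalizing d seen with
  | nil => simpa using hinv
  | cons pi T ih =>
    intro q
    rcases Decidable.em (pi ∈ seen) with h | h
    · have hc : PySem.Set.contains seen pi = true := (PySem.Set.contains_iff seen pi).mpr h
      have hadd : PySem.Set.add seen pi = seen := PySem.Set.add_of_mem h
      simp only [List.foldl_cons, hc, PySem.Set.update_cons, hadd]
      exact ih d seen hnd hinv q
    · have hc : PySem.Set.contains seen pi = false := by
        by_contra hne
        exact h ((PySem.Set.contains_iff seen pi).mp (by revert hne; cases PySem.Set.contains seen pi <;> simp))
      have hadd : PySem.Set.add seen pi = seen ++ [pi] := PySem.Set.add_of_not_mem h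
      simp only [List.foldl_cons, hc, Bool.false_eq_true, if_false, PySem.Set.update_cons, hadd]
      refine ih _ _ ?_ ?_ q
      · have hdisj : ∀ a ∈ seen, ¬ a = pi := fun a ha e => h (e ▸ ha)
        simpa [List.nodup_append] using ⟨hnd, hdisj⟩
      · intro r
        rw [fepi_ins_getD _ _ _ (PySem.List.nodup_dedup _) r, hinv r]
        rcases Decidable.em (r ∈ (PySem.Str.split? pi ",").getD []) with hr | hr
        · simp [hr, List.filter_append]
        · simp [hr, List.filter_append]

-- The counting fold over the minterm's covering list.
theorem fepi_count_fst (F : List String) (c0 : Int) (t0 : Option String) :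
    (F.foldl (fun (p : Int × Option String) b => (p.1 + 1, some b)) (c0, t0)).1
      = c0 + F.length := by
  induction F generalizing c0 t0 with
  | nil => simp
  | cons b F ih => simp [ih]; omega

-- The outer loops agree (A additionally drags the stale t, which never influences X).
theorem fepi_outer (cov : Int → List String) (MT : List Int) (X : List String)
    (t0 : Option String) :
    (MT.foldl (fun (st : List String × Option String) a =>
        let ct := (cov a).foldl (fun (p : Int × Option String) b => (p.1 + 1, some b)) ((0 : Int), st.2)
        (if ct.1 = 1 then
           match ct.2 with
           | some t => if t ∈ st.1 then st.1 else st.1 ++ [t]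
           | none => st.1
         else st.1, ct.2)) (X, t0)).1
      = MT.foldl (fun X a =>
          if (cov a).length = 1 then
            let u := (cov a).headD ""
            if u ∈ X then X else X ++ [u]
          else X) X := by
  induction MT generalizing X t0 with
  | nil => rfl
  | cons a MT ih =>
    simp only [List.foldl_cons]
    have hstep : (if ((cov a).foldl (fun (p : Int × Option String) b => (p.1 + 1, some b)) ((0 : Int), t0)).1 = 1 then
         match ((cov a).foldl (fun (p : Int × Option String) b => (p.1 + 1, some b)) ((0 : Int), t0)).2 with
         | some t => if t ∈ X then X else X ++ [t]
         | none => X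
       else X)
       = (if (cov a).length = 1 then
            (if (cov a).headD "" ∈ X then X else X ++ [(cov a).headD ""]) else X) := by
      rcases hF : cov a with _ | ⟨u, F'⟩
      · simp
      · rcases F' with _ | ⟨v, F''⟩
        · norm_num
        · have h1 := fepi_count_fst (u :: v :: F'') 0 t0
          rw [h1]
          have hne : (0 : Int) + ((u :: v :: F'').length : Int) ≠ 1 := by
            simp; omega
          rw [if_neg (by exact_mod_cast hne)]
          have hlne : (u :: v :: F'').length ≠ 1 := by simp
          rw [if_neg hlne]
    rw [hstep]
    exact ih _ _

-- ===== VERDICT (by name: the statement is the Claim_ definition above) =====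
theorem FEPI_spec : Claim_equal_FEPI := by
  intro T MT _
  unfold Spec_FEPI FEPI FEPI_alt
  have hK : ∀ q, (T.foldl (fun d i => d.insert i ((PySem.Str.split? i ",").getD [])) PySem.Dict.empty).getD q []
      = if q ∈ T then (PySem.Str.split? q ",").getD [] else [] := by
    intro q; rw [fepi_K_getD]; simp
  have hkeys : (T.foldl (fun d i => d.insert i ((PySem.Str.split? i ",").getD [])) PySem.Dict.empty).keys
      = PySem.Set.ofList T := by
    rw [PySem.Dict.keys_foldl_insert]
    simp [PySem.Set.update_nil_left]
  have hidx : ∀ q, (T.foldl (fun (st : PySem.Dict String (List String) × PySem.Set String) pi =>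
        if PySem.Set.contains st.2 pi then st
        else ((PySem.List.dedup ((PySem.Str.split? pi ",").getD [])).foldl
                (fun d term => d.insert term (d.getD term [] ++ [pi])) st.1,
              PySem.Set.add st.2 pi)) (PySem.Dict.empty, PySem.Set.empty)).1.getD q []
      = (PySem.Set.ofList T).filter (fun pi => decide (q ∈ (PySem.Str.split? pi ",").getD [])) := by
    intro q
    have h2 := fepi_idx_getD T PySem.Dict.empty PySem.Set.empty (by simp [PySem.Set.empty])
      (by intro r; simp [PySem.Set.empty, PySem.Dict.getD_empty]) q
    simpa [PySem.Set.empty, PySem.Set.update_nil_left] using h2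
  -- A's inner scan is a fold over the filtered key list = B's index bucket.
  have hinner : ∀ (a : Int) (t0 : Option String),
      ((T.foldl (fun d i => d.insert i ((PySem.Str.split? i ",").getD [])) PySem.Dict.empty).keys).foldl
        (fun (p : Int × Option String) b =>
          if PySem.Int.toStr a ∈ (T.foldl (fun d i => d.insert i ((PySem.Str.split? i ",").getD [])) PySem.Dict.empty).getD b [] then (p.1 + 1, some b) else p) ((0 : Int), t0)
      = ((PySem.Set.ofList T).filter (fun pi => decide (PySem.Int.toStr a ∈ (PySem.Str.split? pi ",").getD []))).foldl
          (fun (p : Int × Option String) b => (p.1 + 1, some b)) ((0 : Int), t0) := by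
    intro a t0
    rw [PySem.List.foldl_ite_eq_foldl_filter, hkeys]
    congr 1
    apply List.filter_congr
    intro b hb
    have hbT : b ∈ T := (PySem.Set.mem_ofList (y := b) (xs := T)).mp hb
    rw [hK b, if_pos hbT]
  simp only [hinner, hidx]
  exact fepi_outer (fun a => (PySem.Set.ofList T).filter
    (fun pi => decide (PySem.Int.toStr a ∈ (PySem.Str.split? pi ",").getD []))) MT [] none
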